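-- pv_equiv track=rewrite | github.com/S-Christensen/cartographersStudy | scoringCards.py | deepwood
-- ===== SOURCE A (Python) =====
-- def dfs(grid, row, col, visited, terrain_type):
--     stack = [(row, col)]
--     cluster = []
--
--     while stack:
--         r, c = stack.pop()
--         if (r, c) not in visited and grid[r][c] == terrain_type:
--             visited.add((r, c))
--             cluster.append((r, c))
--             for dr, dc in [(1, 0), (-1, 0), (0, 1), (0, -1)]:
--                 nr, nc = r + dr, c + dc
--                 if 0 <= nr < len(grid) and 0 <= nc < len(grid[0]):
--                     stack.append((nr, nc))
--     return cluster
--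
-- def is_adjacent_to_village(grid, cluster):
--     for r, c in cluster:
--         for dr, dc in [(1, 0), (-1, 0), (0, 1), (0, -1)]:
--             nr, nc = r + dr, c + dc
--             if 0 <= nr < len(grid) and 0 <= nc < len(grid[0]) and grid[nr][nc] == "village":
--                 return True
--     return False
--
-- def deepwood(grid):
--     visited = set()
--     clusters = []
--
--     for row in range(len(grid)):
--         for col in range(len(grid[0])):
--             if (row, col) not in visited and grid[row][col] == "forest":
--                 cluster = dfs(grid, row, col, visited, "forest")
--                 clusters.append(cluster)
--
--     count = 0
--     for cluster in clusters:
--         if len(cluster) >= 5 and not is_adjacent_to_village(grid, cluster):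
--             count += 1
--
--     return count*6
-- ===== SOURCE B (Python) =====
-- def deepwood(grid):
--     h = len(grid)
--     w = len(grid[0]) if grid else 0
--     cells = [(r, c) for r in range(h) for c in range(w) if grid[r][c] == "forest"]
--     # min-label propagation: each forest cell starts with its row-major index,
--     # then repeatedly takes the minimum over itself and its forest neighbours.
--     labels = {(r, c): r * w + c for (r, c) in cells}
--     for _ in range(len(cells)):
--         new = {}
--         for (r, c) in cells:
--             m = labels[(r, c)]
--             for q in ((r + 1, c), (r - 1, c), (r, c + 1), (r, c - 1)):
--                 if q in labels and labels[q] < m: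
--                     m = labels[q]
--             new[(r, c)] = m
--         labels = new
--     comp = {}
--     for p, l in labels.items():
--         comp.setdefault(l, []).append(p)
--     count = 0
--     for members in comp.values():
--         if len(members) >= 5 and not any(
--             0 <= nr < h and 0 <= nc < w and grid[nr][nc] == "village"
--             for (r, c) in members
--             for (nr, nc) in ((r + 1, c), (r - 1, c), (r, c + 1), (r, c - 1))
--         ):
--             count += 1
--     return count * 6
-- ===== Notes on version B (the rewrite author's own statement) =====
-- stated objective: alternative
-- what changed: Replaces the stack-DFS flood fill with shared visited set and cluster lists by a fixed-point minimum-label propagation: every forest cell starts with its row-major index, labels are relaxed over forest neighbours len(cells) times, and cells are then grouped by their stabilised label (= the component's minimal index); each group is a connected component, counted under the same size/village tests.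
import Mathlib
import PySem

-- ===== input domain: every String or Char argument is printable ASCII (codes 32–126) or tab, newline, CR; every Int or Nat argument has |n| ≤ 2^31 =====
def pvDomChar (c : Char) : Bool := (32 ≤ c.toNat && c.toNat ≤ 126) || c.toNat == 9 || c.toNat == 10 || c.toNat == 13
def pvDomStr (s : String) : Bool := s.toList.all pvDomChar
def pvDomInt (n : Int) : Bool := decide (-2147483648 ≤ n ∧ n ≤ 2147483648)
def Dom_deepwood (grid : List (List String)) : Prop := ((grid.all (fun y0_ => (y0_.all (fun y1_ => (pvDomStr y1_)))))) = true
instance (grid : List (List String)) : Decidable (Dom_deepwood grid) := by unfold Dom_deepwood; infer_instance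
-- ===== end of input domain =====

-- B replaces A's stack-DFS flood fill by fixed-point minimum-label propagation over the forest
-- cells followed by grouping on the stabilised labels (objective: alternative, same result).
-- ===== PORT A =====
-- A-side helpers (`dfs` / `is_adjacent_to_village` from the Python module).
-- grid[r][c] (possibly raising) is modelled by an Option; Pre_deepwood excludes the raising inputs.
def pvCellAt (grid : List (List String)) (r c : Int) : Option String :=
  (PySem.List.pyGet? grid r).bind (fun row => PySem.List.pyGet? row c)

-- len(grid[0]); only meaningful when grid ≠ [] (Python evaluates it only inside loops that then ran)
def pvWidth (grid : List (List String)) : Int :=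
  (((PySem.List.pyGet? grid 0).getD []).length : Int)

-- the four neighbours (1,0),(-1,0),(0,1),(0,-1) that pass the bounds check, pushed at the end
-- of the stack in that order; the port keeps the stack top-first, hence the reverse.
def pvPushes (h w : Int) (p : Int × Int) : List (Int × Int) :=
  ((([((1:Int),(0:Int)), (-1,0), (0,1), (0,-1)]).map (fun d => (p.1 + d.1, p.2 + d.2))).filter
    (fun q => decide (0 ≤ q.1 ∧ q.1 < h ∧ 0 ≤ q.2 ∧ q.2 < w))).reverse

-- the while-stack loop of dfs; fuel only makes the loop total, one unit per iteration
def pvDfsLoop (grid : List (List String)) (terrain : String) :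
    Nat → List (Int × Int) → PySem.Set (Int × Int) → List (Int × Int) →
    PySem.Set (Int × Int) × List (Int × Int)
  | _, [], visited, cluster => (visited, cluster)
  | 0, _ :: _, visited, cluster => (visited, cluster)
  | fuel + 1, p :: rest, visited, cluster =>
      if p ∉ visited ∧ pvCellAt grid p.1 p.2 = some terrain then
        pvDfsLoop grid terrain fuel (pvPushes grid.length (pvWidth grid) p ++ rest)
          (PySem.Set.add visited p) (cluster ++ [p])
      else pvDfsLoop grid terrain fuel rest visited cluster

-- enough fuel for the whole loop (5 iterations can be charged to each freshly visited cell)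
def pvFuel (grid : List (List String)) : Nat :=
  5 * grid.length * (pvWidth grid).toNat + 2

def pvDfs (grid : List (List String)) (row col : Int) (visited : PySem.Set (Int × Int))
    (terrain : String) : PySem.Set (Int × Int) × List (Int × Int) :=
  pvDfsLoop grid terrain (pvFuel grid) [(row, col)] visited []

-- is_adjacent_to_village: early `return True` is List.any
def pvIsAdjVillage (grid : List (List String)) (cluster : List (Int × Int)) : Bool :=
  cluster.any (fun p =>
    ([((1:Int),(0:Int)), (-1,0), (0,1), (0,-1)]).any (fun d =>
      decide (0 ≤ p.1 + d.1 ∧ p.1 + d.1 < (grid.length : Int) ∧ 0 ≤ p.2 + d.2 ∧ p.2 + d.2 < pvWidth grid) &&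
      (pvCellAt grid (p.1 + d.1) (p.2 + d.2) == some "village")))

def deepwood (grid : List (List String)) : Int :=
  let scan :=
    (PySem.List.pyRange 0 (grid.length : Int) 1).foldl (fun st row =>
      (PySem.List.pyRange 0 (pvWidth grid) 1).foldl (fun st col =>
        if (row, col) ∉ st.1 ∧ pvCellAt grid row col = some "forest" then
          let vc := pvDfs grid row col st.1 "forest"
          (vc.1, st.2 ++ [vc.2])
        else st) st)
      (([] : PySem.Set (Int × Int)), ([] : List (List (Int × Int))))
  let count :=
    scan.2.foldl (fun n cluster =>
      if 5 ≤ cluster.length ∧ pvIsAdjVillage grid cluster = false then n + 1 else n) (0 : Int)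
  count * 6

-- ===== PORT B =====
-- B-side helpers (transliteration of Source B: min-label propagation, then grouping by label)
def pvNbrs (p : Int × Int) : List (Int × Int) :=
  [(p.1 + 1, p.2), (p.1 - 1, p.2), (p.1, p.2 + 1), (p.1, p.2 - 1)]

def pvWidthB (grid : List (List String)) : Int :=
  match grid with
  | [] => 0
  | g0 :: _ => (g0.length : Int)

def pvCells (grid : List (List String)) : List (Int × Int) :=
  (PySem.List.pyRange 0 (grid.length : Int) 1).flatMap (fun r =>
    ((PySem.List.pyRange 0 (pvWidthB grid) 1).filter
      (fun c => pvCellAt grid r c == some "forest")).map (fun c => (r, c)))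

-- one pass: new[p] = min over p and its forest neighbours of the old label
def pvPass (cells : List (Int × Int)) (labels : PySem.Dict (Int × Int) Int) :
    PySem.Dict (Int × Int) Int :=
  cells.foldl (fun new p =>
    new.insert p ((pvNbrs p).foldl (fun m q =>
      match labels.get? q with
      | some v => if v < m then v else m
      | none => m) (labels.getD p 0))) PySem.Dict.empty

def pvVillB (grid : List (List String)) (h w : Int) (members : List (Int × Int)) : Bool :=
  members.any (fun p =>
    (pvNbrs p).any (fun q =>
      decide (0 ≤ q.1 ∧ q.1 < h ∧ 0 ≤ q.2 ∧ q.2 < w) && (pvCellAt grid q.1 q.2 == some "village")))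

def deepwood_alt (grid : List (List String)) : Int :=
  let h : Int := (grid.length : Int)
  let w : Int := pvWidthB grid
  let cells := pvCells grid
  let labels0 : PySem.Dict (Int × Int) Int :=
    cells.foldl (fun d p => d.insert p (p.1 * w + p.2)) PySem.Dict.empty
  let labels :=
    (PySem.List.pyRange 0 (cells.length : Int) 1).foldl (fun lab _ => pvPass cells lab) labels0
  let comp : PySem.Dict Int (List (Int × Int)) :=
    labels.items.foldl (fun d pl => d.modify pl.2 [] (· ++ [pl.1])) PySem.Dict.empty
  let count :=
    comp.values.foldl (fun n members =>
      if 5 ≤ members.length ∧ pvVillB grid h w members = false then n + 1 else n) (0 : Int)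
  count * 6

-- ===== PRECONDITION & SPEC =====
-- Pre_: every row is at least as long as row 0 (A raises IndexError on shorter rows); the
-- rows beyond column len(grid[0])-1 are never read, so longer rows are admitted.
def Pre_deepwood (grid : List (List String)) : Prop :=
  ∀ row ∈ grid, (grid.headD []).length ≤ row.length
instance (grid : List (List String)) : Decidable (Pre_deepwood grid) := by
  unfold Pre_deepwood; infer_instance
def pvWitness_deepwood : List (List String) :=
  [["forest", "village"], ["forest", "water", "x"]]
def Spec_deepwood (grid : List (List String)) (out : Int) : Prop := out = deepwood_alt grid
instance (grid : List (List String)) (out : Int) : Decidable (Spec_deepwood grid out) := by unfold Spec_deepwood; infer_instance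

-- ===== CLAIM (what is proved, stated in full; the proofs are below) =====
def Claim_equal_deepwood : Prop := ∀ (grid : List (List String)), Dom_deepwood grid → Pre_deepwood grid → Spec_deepwood grid (deepwood grid)


-- ===== LEMMAS AND PROOFS =====

-- ---- basic geometry ----
def pvInB (h w : Int) (p : Int × Int) : Prop := 0 ≤ p.1 ∧ p.1 < h ∧ 0 ≤ p.2 ∧ p.2 < w

-- Bool form of "forest cell" (keeps proof-side functions computable without extra instances)
def pvFb (G : List (List String)) (p : Int × Int) : Bool :=
  decide (0 ≤ p.1 ∧ p.1 < (G.length : Int) ∧ 0 ≤ p.2 ∧ p.2 < pvWidth G) &&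
  (pvCellAt G p.1 p.2 == some "forest")

def pvAdj (p q : Int × Int) : Prop := q ∈ pvNbrs p

def pvF (G : List (List String)) (p : Int × Int) : Prop := pvFb G p = true

def pvQ (G : List (List String)) (V : List (Int × Int)) (p : Int × Int) : Prop :=
  pvF G p ∧ p ∉ V

def pvIdx (w : Int) (p : Int × Int) : Int := p.1 * w + p.2

-- all in-bounds cells, row-major
def pvScanL (G : List (List String)) : List (Int × Int) :=
  (PySem.List.pyRange 0 (G.length : Int) 1).flatMap (fun r =>
    (PySem.List.pyRange 0 (pvWidth G) 1).map (fun c => (r, c)))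

-- reachability through cells satisfying P, along grid adjacency
inductive pvReach (P : (Int × Int) → Prop) : (Int × Int) → (Int × Int) → Prop
  | refl (p : Int × Int) (hp : P p) : pvReach P p p
  | head (p q r : Int × Int) (hp : P p) (ha : pvAdj p q) (ht : pvReach P q r) : pvReach P p r

-- reachability in at most k steps (Source B's relaxation depth)
def pvReachN (G : List (List String)) : Nat → (Int × Int) → (Int × Int) → Prop
  | 0, p, q => q = p
  | k + 1, p, q => pvReachN G k p q ∨ ∃ t ∈ pvNbrs p, pvF G t ∧ pvReachN G k t q

def pvMinSpec (S : (Int × Int) → Prop) (w v : Int) : Prop :=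
  (∃ q, S q ∧ v = pvIdx w q) ∧ (∀ q, S q → v ≤ pvIdx w q)

-- value of Source B's labels dict after k passes
def pvVal (G : List (List String)) : Nat → (Int × Int) → Int
  | 0, p => pvIdx (pvWidth G) p
  | k + 1, p => (pvNbrs p).foldl (fun m q =>
      if pvFb G q then (if pvVal G k q < m then pvVal G k q else m) else m) (pvVal G k p)

def pvClosed (G : List (List String)) (V : List (Int × Int)) : Prop :=
  ∀ x ∈ V, ∀ y, pvF G y → pvAdj x y → y ∈ V

def pvClustersOK (G : List (List String)) (Cl : List (List (Int × Int)))
    (V : List (Int × Int)) : Prop :=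
  (∀ K ∈ Cl, K.Nodup ∧ ∃ s, pvF G s ∧ (∀ q, q ∈ K ↔ pvReach (pvF G) s q)) ∧
  List.Pairwise (fun K K' => ∀ x, x ∈ K → x ∉ K') Cl ∧
  (∀ p, p ∈ V ↔ ∃ K ∈ Cl, p ∈ K)

-- Bool predicate on a component's member set: the counted condition of both programs
-- "some neighbour of p is an in-bounds village cell"
def pvVillNb (G : List (List String)) (p : Int × Int) : Bool :=
  (pvNbrs p).any (fun q =>
    decide (0 ≤ q.1 ∧ q.1 < (G.length : Int) ∧ 0 ≤ q.2 ∧ q.2 < pvWidth G) &&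
    (pvCellAt G q.1 q.2 == some "village"))

def pvPredSet (G : List (List String)) (X : Finset (Int × Int)) : Bool :=
  decide (5 ≤ X.card) && !(decide (∃ p ∈ X, pvVillNb G p = true))

-- ---- small facts ----
theorem pv_widthB_eq (G : List (List String)) : pvWidthB G = pvWidth G := by
  cases G with
  | nil => simp [pvWidthB, pvWidth, PySem.List.pyGet?]
  | cons g0 gs => simp [pvWidthB, pvWidth, PySem.List.pyGet?_zero_cons]

theorem pv_adj_symm {p q : Int × Int} (h : pvAdj p q) : pvAdj q p := by
  obtain ⟨a, b⟩ := p; obtain ⟨c, d⟩ := q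
  simp only [pvAdj, pvNbrs, List.mem_cons, List.not_mem_nil, or_false, Prod.mk.injEq] at h ⊢
  omega

theorem pv_mem_pushes (h w : Int) (p q : Int × Int) :
    q ∈ pvPushes h w p ↔ pvAdj p q ∧ pvInB h w q := by
  obtain ⟨a, b⟩ := p; obtain ⟨c, d⟩ := q
  simp only [pvPushes, pvAdj, pvNbrs, pvInB, List.mem_reverse, List.mem_filter,
    List.mem_map, List.mem_cons, List.not_mem_nil, or_false, Prod.mk.injEq, decide_eq_true_eq]
  constructor
  · rintro ⟨⟨e, he, heq⟩, hb⟩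
    refine ⟨?_, hb⟩
    rcases he with rfl | rfl | rfl | rfl <;> simp only at heq <;>
      obtain ⟨rfl, rfl⟩ := heq <;> simp [Prod.ext_iff] <;> omega
  · rintro ⟨hd, hb⟩
    refine ⟨?_, hb⟩
    rcases hd with ⟨rfl, rfl⟩ | ⟨rfl, rfl⟩ | ⟨rfl, rfl⟩ | ⟨rfl, rfl⟩
    · exact ⟨(1, 0), by simp, by simp [Prod.ext_iff]⟩
    · exact ⟨(-1, 0), by simp, by simp [Prod.ext_iff]; omega⟩
    · exact ⟨(0, 1), by simp, by simp [Prod.ext_iff]⟩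
    · exact ⟨(0, -1), by simp, by simp [Prod.ext_iff]; omega⟩

theorem pv_mem_scanL (G : List (List String)) (p : Int × Int) :
    p ∈ pvScanL G ↔ pvInB (G.length : Int) (pvWidth G) p := by
  obtain ⟨a, b⟩ := p
  simp [pvScanL, pvInB, List.mem_flatMap, PySem.List.mem_pyRange_one, and_assoc]

theorem pv_scanL_length (G : List (List String)) :
    (pvScanL G).length = G.length * (pvWidth G).toNat := by
  simp only [pvScanL, List.length_flatMap, List.length_map, PySem.List.length_pyRange_one]
  simp [List.map_const', List.sum_replicate, smul_eq_mul]

theorem pv_idx_inj (G : List (List String)) {p q : Int × Int}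
    (hp : pvF G p) (hq : pvF G q) (h : pvIdx (pvWidth G) p = pvIdx (pvWidth G) q) : p = q := by
  obtain ⟨a, b⟩ := p; obtain ⟨c, d⟩ := q
  simp only [pvF, pvFb, Bool.and_eq_true, decide_eq_true_eq] at hp hq
  obtain ⟨⟨ha0, hah, hb0, hbw⟩, -⟩ := hp
  obtain ⟨⟨hc0, hch, hd0, hdw⟩, -⟩ := hq
  simp only [pvIdx] at h
  have hw0 : (0 : Int) ≤ pvWidth G := by omega
  have hac : a = c := by
    by_contra hne
    rcases lt_or_gt_of_ne hne with hlt | hgt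
    · have h2 : (1 : Int) ≤ c - a := by omega
      have h3 : pvWidth G ≤ (c - a) * pvWidth G := le_mul_of_one_le_left hw0 h2
      have h4 : (c - a) * pvWidth G = b - d := by linear_combination -h
      omega
    · have h2 : (1 : Int) ≤ a - c := by omega
      have h3 : pvWidth G ≤ (a - c) * pvWidth G := le_mul_of_one_le_left hw0 h2
      have h4 : (a - c) * pvWidth G = d - b := by linear_combination h
      omega
  cases hac
  have hbd : b = d := by omega
  cases hbd
  rfl

-- ---- pvReach toolbox ----
theorem pv_reach_start {P : (Int × Int) → Prop} {p q : Int × Int} (h : pvReach P p q) : P p := by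
  cases h with
  | refl _ hp => exact hp
  | head _ _ _ hp _ _ => exact hp

theorem pv_reach_end {P : (Int × Int) → Prop} {p q : Int × Int} (h : pvReach P p q) : P q := by
  induction h with
  | refl _ hp => exact hp
  | head _ _ _ _ _ _ ih => exact ih

theorem pv_reach_mono {P P' : (Int × Int) → Prop} (hPP : ∀ x, P x → P' x)
    {p q : Int × Int} (h : pvReach P p q) : pvReach P' p q := by
  induction h with
  | refl p hp => exact .refl p (hPP _ hp)
  | head p q r hp ha _ ih => exact .head p q r (hPP _ hp) ha ih

theorem pv_reach_trans {P : (Int × Int) → Prop} {p q r : Int × Int}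
    (h1 : pvReach P p q) (h2 : pvReach P q r) : pvReach P p r := by
  induction h1 with
  | refl _ _ => exact h2
  | head p q' r' hp ha _ ih => exact .head p q' r hp ha (ih h2)

theorem pv_reach_snoc {P : (Int × Int) → Prop} {p q r : Int × Int}
    (h1 : pvReach P p q) (ha : pvAdj q r) (hr : P r) : pvReach P p r :=
  pv_reach_trans h1 (.head q r r (pv_reach_end h1) ha (.refl r hr))

theorem pv_reach_symm {P : (Int × Int) → Prop} {p q : Int × Int}
    (h : pvReach P p q) : pvReach P q p := by
  induction h with
  | refl p hp => exact .refl p hp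
  | head p q r hp ha _ ih => exact pv_reach_snoc ih (pv_adj_symm ha) hp

theorem pv_reach_elim {P : (Int × Int) → Prop} (z : Int × Int) {s q : Int × Int}
    (h : pvReach P s q) :
    pvReach (fun x => P x ∧ x ≠ z) s q ∨ q = z ∨
      ∃ t, pvAdj z t ∧ pvReach (fun x => P x ∧ x ≠ z) t q := by
  induction h with
  | refl p hp =>
    by_cases hz : p = z
    · exact Or.inr (Or.inl hz)
    · exact Or.inl (.refl p ⟨hp, hz⟩)
  | head p q' r hp ha _ ih =>
    rcases ih with h1 | h1 | h1
    · by_cases hz : p = z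
      · exact Or.inr (Or.inr ⟨q', hz ▸ ha, h1⟩)
      · exact Or.inl (.head p q' r ⟨hp, hz⟩ ha h1)
    · exact Or.inr (Or.inl h1)
    · exact Or.inr (Or.inr h1)

-- ---- the dfs stack loop ----
theorem pv_q_append (G : List (List String)) (V : List (Int × Int)) (p x : Int × Int) :
    pvQ G (V ++ [p]) x ↔ pvQ G V x ∧ x ≠ p := by
  simp [pvQ, List.mem_append]; tauto

theorem pv_front_step (G : List (List String)) (V : List (Int × Int)) (p : Int × Int)
    (rest : List (Int × Int)) (hQ : pvQ G V p) (q : Int × Int) :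
    (∃ s ∈ p :: rest, pvReach (pvQ G V) s q) ↔
      (q = p ∨ ∃ s ∈ pvPushes (G.length : Int) (pvWidth G) p ++ rest,
        pvReach (pvQ G (V ++ [p])) s q) := by
  constructor
  · rintro ⟨s, hs, hr⟩
    rcases pv_reach_elim p hr with h1 | h1 | ⟨t, hat, htr⟩
    · rcases List.mem_cons.mp hs with rfl | hs'
      · exact absurd rfl (pv_reach_start h1).2
      · exact Or.inr ⟨s, List.mem_append_right _ hs',
          pv_reach_mono (fun x hx => (pv_q_append G V p x).mpr hx) h1⟩
    · exact Or.inl h1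
    · have hst := pv_reach_start htr
      have htInB : pvInB (G.length : Int) (pvWidth G) t := by
        have : pvF G t := hst.1.1
        simp only [pvF, pvFb, Bool.and_eq_true, decide_eq_true_eq] at this
        exact this.1
      exact Or.inr ⟨t, List.mem_append_left _ ((pv_mem_pushes _ _ _ _).mpr ⟨hat, htInB⟩),
        pv_reach_mono (fun x hx => (pv_q_append G V p x).mpr hx) htr⟩
  · rintro (rfl | ⟨s, hs, hr⟩)
    · exact ⟨q, List.mem_cons_self, .refl q hQ⟩
    · have hr' : pvReach (pvQ G V) s q :=
        pv_reach_mono (fun x hx => ((pv_q_append G V p x).mp hx).1) hr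
      rcases List.mem_append.mp hs with hps | hrest
      · exact ⟨p, List.mem_cons_self,
          .head p s q hQ ((pv_mem_pushes _ _ _ _).mp hps).1 hr'⟩
      · exact ⟨s, List.mem_cons_of_mem _ hrest, hr'⟩

theorem pv_V_le_scan (G : List (List String)) (V : List (Int × Int)) (hVnd : V.Nodup)
    (hVF : ∀ p ∈ V, pvF G p) : V.length ≤ (pvScanL G).length := by
  refine (List.subperm_of_subset hVnd ?_).length_le
  intro x hx
  have hF := hVF x hx
  simp only [pvF, pvFb, Bool.and_eq_true, decide_eq_true_eq] at hF
  exact (pv_mem_scanL G x).mpr hF.1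

theorem pv_pushes_len (h w : Int) (p : Int × Int) : (pvPushes h w p).length ≤ 4 := by
  simp only [pvPushes, List.length_reverse]
  exact le_trans (List.length_filter_le _ _) (by simp)

theorem pv_dfsLoop_spec (G : List (List String)) :
    ∀ (fuel : Nat) (S V K : List (Int × Int)),
    (∀ p ∈ S, pvInB (G.length : Int) (pvWidth G) p) →
    V.Nodup → (∀ p ∈ V, pvF G p) →
    5 * (pvScanL G).length + S.length ≤ fuel + 5 * V.length →
    ∃ L : List (Int × Int),
      pvDfsLoop G "forest" fuel S V K = (V ++ L, K ++ L) ∧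
      L.Nodup ∧ (∀ q, q ∈ L ↔ ∃ s ∈ S, pvReach (pvQ G V) s q) := by
  intro fuel
  induction fuel with
  | zero =>
    intro S V K hS hVnd hVF hfuel
    cases S with
    | nil => exact ⟨[], by simp [pvDfsLoop], by simp, by simp⟩
    | cons p rest =>
      exfalso
      have := pv_V_le_scan G V hVnd hVF
      simp only [List.length_cons] at hfuel
      omega
  | succ fuel ih =>
    intro S V K hS hVnd hVF hfuel
    cases S with
    | nil => exact ⟨[], by simp [pvDfsLoop], by simp, by simp⟩
    | cons p rest =>
      by_cases hcond : p ∉ V ∧ pvCellAt G p.1 p.2 = some "forest"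
      · have hpV : p ∉ V := hcond.1
        have hInB : pvInB (G.length : Int) (pvWidth G) p := hS p List.mem_cons_self
        have hpF : pvF G p := by
          simp only [pvF, pvFb, Bool.and_eq_true, decide_eq_true_eq, beq_iff_eq]
          exact ⟨hInB, hcond.2⟩
        have hadd : PySem.Set.add V p = V ++ [p] := PySem.Set.add_of_not_mem hpV
        have hS' : ∀ x ∈ pvPushes (G.length : Int) (pvWidth G) p ++ rest,
            pvInB (G.length : Int) (pvWidth G) x := by
          intro x hx
          rcases List.mem_append.mp hx with hx | hx
          · exact ((pv_mem_pushes _ _ _ _).mp hx).2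
          · exact hS x (List.mem_cons_of_mem _ hx)
        have hVnd' : (V ++ [p]).Nodup := by
          rw [List.nodup_append]
          refine ⟨hVnd, List.nodup_singleton _, ?_⟩
          intro x hxV y hyp
          rw [List.mem_singleton] at hyp; subst hyp
          exact fun he => hpV (he ▸ hxV)
        have hVF' : ∀ x ∈ V ++ [p], pvF G x := by
          intro x hx
          rcases List.mem_append.mp hx with hx | hx
          · exact hVF x hx
          · simpa using (List.mem_singleton.mp hx) ▸ hpF
        have hfuel' : 5 * (pvScanL G).length +
            (pvPushes (G.length : Int) (pvWidth G) p ++ rest).length ≤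
            fuel + 5 * (V ++ [p]).length := by
          have h4 := pv_pushes_len (G.length : Int) (pvWidth G) p
          simp only [List.length_append, List.length_cons] at hfuel ⊢
          omega
        obtain ⟨L', hloop, hnd', hmem'⟩ := ih _ _ (K ++ [p]) hS' hVnd' hVF' hfuel'
        refine ⟨p :: L', ?_, ?_, ?_⟩
        · rw [pvDfsLoop, if_pos hcond, hadd, hloop]
          simp [List.append_assoc]
        · refine List.nodup_cons.mpr ⟨?_, hnd'⟩
          intro hpL
          obtain ⟨s, _, hr⟩ := (hmem' p).mp hpL
          exact (pv_reach_end hr).2 (List.mem_append_right _ (by simp))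
        · intro q
          rw [List.mem_cons, hmem' q]
          exact (pv_front_step G V p rest ⟨hpF, hpV⟩ q).symm
      · have hfuel' : 5 * (pvScanL G).length + rest.length ≤ fuel + 5 * V.length := by
          simp only [List.length_cons] at hfuel; omega
        obtain ⟨L', hloop, hnd', hmem'⟩ := ih rest V K (fun x hx => hS x (List.mem_cons_of_mem _ hx)) hVnd hVF hfuel'
        refine ⟨L', by rw [pvDfsLoop, if_neg hcond]; exact hloop, hnd', ?_⟩
        intro q
        rw [hmem' q]
        constructor
        · rintro ⟨s, hs, hr⟩; exact ⟨s, List.mem_cons_of_mem _ hs, hr⟩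
        · rintro ⟨s, hs, hr⟩
          rcases List.mem_cons.mp hs with rfl | hs'
          · exfalso
            have hst := pv_reach_start hr
            have : pvCellAt G s.1 s.2 = some "forest" := by
              have := hst.1
              simp only [pvF, pvFb, Bool.and_eq_true, decide_eq_true_eq, beq_iff_eq] at this
              exact this.2
            exact hcond ⟨hst.2, this⟩
          · exact ⟨s, hs', hr⟩

-- visited sets that are unions of full components do not cut reachability
theorem pv_reach_of_closed (G : List (List String)) (V : List (Int × Int))
    (hC : pvClosed G V) {p q : Int × Int} (hp : p ∉ V) (h : pvReach (pvF G) p q) :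
    pvReach (pvQ G V) p q := by
  induction h with
  | refl p hF => exact .refl p ⟨hF, hp⟩
  | head p t r hF ha ht ih =>
    have htV : t ∉ V := by
      intro htV
      exact hp (hC t htV p hF (pv_adj_symm ha))
    exact .head p t r ⟨hF, hp⟩ ha (ih htV)

-- ---- the outer scan of A ----
def pvStep (G : List (List String))
    (st : PySem.Set (Int × Int) × List (List (Int × Int))) (p : Int × Int) :
    PySem.Set (Int × Int) × List (List (Int × Int)) :=
  if p ∉ st.1 ∧ pvCellAt G p.1 p.2 = some "forest" then
    ((pvDfs G p.1 p.2 st.1 "forest").1, st.2 ++ [(pvDfs G p.1 p.2 st.1 "forest").2])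
  else st

theorem pv_foldl_flatMap {α β γ : Type} (l : List α) (g : α → List β) (f : γ → β → γ)
    (init : γ) :
    (l.flatMap g).foldl f init = l.foldl (fun acc x => (g x).foldl f acc) init := by
  induction l generalizing init with
  | nil => rfl
  | cons a l ih => simp [List.flatMap_cons, List.foldl_append, ih]

theorem pv_deepwood_eq_scan (G : List (List String)) :
    deepwood G =
      ((pvScanL G).foldl (pvStep G) ([], [])).2.foldl (fun n cluster =>
        if 5 ≤ cluster.length ∧ pvIsAdjVillage G cluster = false then n + 1 else n) (0 : Int)
        * 6 := by
  rw [pvScanL, pv_foldl_flatMap]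
  simp only [List.foldl_map]
  rfl

theorem pv_scanFold_spec (G : List (List String)) :
    ∀ (todo : List (Int × Int)) (V : PySem.Set (Int × Int)) (Cl : List (List (Int × Int))),
    (∀ p ∈ todo, pvInB (G.length : Int) (pvWidth G) p) →
    V.Nodup → (∀ p ∈ V, pvF G p) → pvClosed G V → pvClustersOK G Cl V →
    ((todo.foldl (pvStep G) (V, Cl)).1.Nodup ∧
     (∀ p ∈ (todo.foldl (pvStep G) (V, Cl)).1, pvF G p) ∧
     pvClosed G (todo.foldl (pvStep G) (V, Cl)).1 ∧
     pvClustersOK G (todo.foldl (pvStep G) (V, Cl)).2 (todo.foldl (pvStep G) (V, Cl)).1 ∧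
     (∀ p ∈ todo, pvF G p → p ∈ (todo.foldl (pvStep G) (V, Cl)).1) ∧
     (∀ x ∈ V, x ∈ (todo.foldl (pvStep G) (V, Cl)).1)) := by
  intro todo
  induction todo with
  | nil =>
    intro V Cl htodo hVnd hVF hCls hOK
    exact ⟨hVnd, hVF, hCls, hOK, by simp, fun x hx => hx⟩
  | cons p todo ih =>
    intro V Cl htodo hVnd hVF hCls hOK
    have hInB : pvInB (G.length : Int) (pvWidth G) p := htodo p List.mem_cons_self
    by_cases hcond : p ∉ V ∧ pvCellAt G p.1 p.2 = some "forest"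
    · have hpF : pvF G p := by
        simp only [pvF, pvFb, Bool.and_eq_true, decide_eq_true_eq, beq_iff_eq]
        exact ⟨hInB, hcond.2⟩
      have hfuel : 5 * (pvScanL G).length + ([p] : List (Int × Int)).length ≤
          pvFuel G + 5 * V.length := by
        rw [pv_scanL_length, pvFuel]
        have hmul : 5 * (G.length * (pvWidth G).toNat) = 5 * G.length * (pvWidth G).toNat := by
          ring
        simp only [List.length_cons, List.length_nil]
        omega
      obtain ⟨L, hloop, hLnd, hLmem⟩ :=
        pv_dfsLoop_spec G (pvFuel G) [p] V []
          (by intro x hx; rw [List.mem_singleton] at hx; exact hx ▸ hInB) hVnd hVF hfuel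
      have hdfs : pvDfs G p.1 p.2 V "forest" = (V ++ L, L) := by
        rw [pvDfs]; simpa using hloop
      have hLreach : ∀ q, q ∈ L ↔ pvReach (pvF G) p q := by
        intro q
        rw [hLmem q]
        constructor
        · rintro ⟨s, hs, hr⟩
          rw [List.mem_singleton] at hs; subst hs
          exact pv_reach_mono (fun x hx => hx.1) hr
        · intro hr
          exact ⟨p, List.mem_singleton_self _, pv_reach_of_closed G V hCls hcond.1 hr⟩
      have hQL : ∀ q ∈ L, pvQ G V q := by
        intro q hq
        obtain ⟨s, _, hr⟩ := (hLmem q).mp hq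
        exact pv_reach_end hr
      have hVnd' : (V ++ L).Nodup := by
        rw [List.nodup_append]
        exact ⟨hVnd, hLnd, fun x hxV y hyL he => (hQL y hyL).2 (he ▸ hxV)⟩
      have hVF' : ∀ x ∈ V ++ L, pvF G x := fun x hx =>
        (List.mem_append.mp hx).elim (hVF x) (fun h => (hQL x h).1)
      have hCls' : pvClosed G (V ++ L) := by
        intro x hx y hyF hadj
        rcases List.mem_append.mp hx with hxV | hxL
        · exact List.mem_append_left _ (hCls x hxV y hyF hadj)
        · refine List.mem_append_right _ ?_
          rw [hLreach y]
          exact pv_reach_snoc ((hLreach x).mp hxL) hadj hyF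
      have hOK' : pvClustersOK G (Cl ++ [L]) (V ++ L) := by
        obtain ⟨hK, hPw, hVI⟩ := hOK
        refine ⟨?_, ?_, ?_⟩
        · intro K hKmem
          rcases List.mem_append.mp hKmem with h | h
          · exact hK K h
          · rw [List.mem_singleton] at h; subst h
            exact ⟨hLnd, p, hpF, hLreach⟩
        · rw [List.pairwise_append]
          refine ⟨hPw, List.pairwise_singleton _ _, ?_⟩
          intro K hKCl K' hK' x hxK hxL
          rw [List.mem_singleton] at hK'; subst hK'
          exact (hQL x hxL).2 ((hVI x).mpr ⟨K, hKCl, hxK⟩)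
        · intro x
          rw [List.mem_append, hVI x]
          constructor
          · rintro (h | h)
            · obtain ⟨K, hK1, hK2⟩ := h
              exact ⟨K, List.mem_append_left _ hK1, hK2⟩
            · exact ⟨L, List.mem_append_right _ (List.mem_singleton_self _), h⟩
          · rintro ⟨K, hKm, hxK⟩
            rcases List.mem_append.mp hKm with h | h
            · exact Or.inl ⟨K, h, hxK⟩
            · rw [List.mem_singleton] at h; subst h; exact Or.inr hxK
      have hstep : pvStep G (V, Cl) p = (V ++ L, Cl ++ [L]) := by
        rw [pvStep, if_pos hcond, hdfs]
      rw [List.foldl_cons, hstep]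
      obtain ⟨a1, a2, a3, a4, a5, a6⟩ :=
        ih (V ++ L) (Cl ++ [L]) (fun x hx => htodo x (List.mem_cons_of_mem _ hx))
          hVnd' hVF' hCls' hOK'
      refine ⟨a1, a2, a3, a4, ?_, ?_⟩
      · intro x hx hxF
        rcases List.mem_cons.mp hx with rfl | hx'
        · exact a6 x (List.mem_append_right _ ((hLreach x).mpr (.refl x hpF)))
        · exact a5 x hx' hxF
      · intro x hxV
        exact a6 x (List.mem_append_left _ hxV)
    · have hstep : pvStep G (V, Cl) p = (V, Cl) := by rw [pvStep, if_neg hcond]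
      rw [List.foldl_cons, hstep]
      obtain ⟨a1, a2, a3, a4, a5, a6⟩ :=
        ih V Cl (fun x hx => htodo x (List.mem_cons_of_mem _ hx)) hVnd hVF hCls hOK
      refine ⟨a1, a2, a3, a4, ?_, a6⟩
      intro x hx hxF
      rcases List.mem_cons.mp hx with rfl | hx'
      · have hxV : x ∈ V := by
          by_contra hxV
          apply hcond
          refine ⟨hxV, ?_⟩
          simp only [pvF, pvFb, Bool.and_eq_true, decide_eq_true_eq, beq_iff_eq] at hxF
          exact hxF.2
        exact a6 x hxV
      · exact a5 x hx' hxF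

-- ---- paths, shortening, and the relaxation depth ----
theorem pv_reach_iff_chain (P : (Int × Int) → Prop) (p q : Int × Int) :
    pvReach P p q ↔ P p ∧ ∃ l, List.IsChain pvAdj (p :: l) ∧ (∀ x ∈ l, P x) ∧
      (p :: l).getLast? = some q := by
  constructor
  · intro h
    induction h with
    | refl p hp => exact ⟨hp, [], List.isChain_singleton _, by simp, by simp⟩
    | head p q' r hp ha ht ih =>
      obtain ⟨hq', l, hch, hl, hlast⟩ := ih
      refine ⟨hp, q' :: l, List.isChain_cons_cons.mpr ⟨ha, hch⟩, ?_, ?_⟩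
      · intro x hx
        rcases List.mem_cons.mp hx with rfl | hx'
        · exact hq'
        · exact hl x hx'
      · rw [List.getLast?_cons_cons]; exact hlast
  · rintro ⟨hp, l, hch, hl, hlast⟩
    induction l generalizing p with
    | nil =>
      simp only [List.getLast?_singleton, Option.some.injEq] at hlast
      exact hlast ▸ .refl p hp
    | cons x t ih =>
      have h2 := List.isChain_cons_cons.mp hch
      exact .head p x q hp h2.1
        (ih x (hl x List.mem_cons_self) h2.2 (fun y hy => hl y (List.mem_cons_of_mem _ hy))
          (by rw [List.getLast?_cons_cons] at hlast; exact hlast))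

theorem pv_chain_shorten_aux :
    ∀ (n : Nat) (l : List (Int × Int)) (p : Int × Int), l.length ≤ n →
    List.IsChain pvAdj (p :: l) →
    ∃ l', l' ⊆ l ∧ l'.length ≤ l.length ∧ List.IsChain pvAdj (p :: l') ∧
      (p :: l').getLast? = (p :: l).getLast? ∧ (p :: l').Nodup := by
  intro n
  induction n with
  | zero =>
    intro l p hlen _
    rw [List.length_eq_zero_iff.mp (Nat.le_zero.mp hlen)]
    exact ⟨[], by simp, by simp, List.isChain_singleton _, rfl, by simp⟩
  | succ n ih =>
    intro l p hlen hch
    by_cases hnd : (p :: l).Nodup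
    · exact ⟨l, fun _ h => h, le_refl _, hch, rfl, hnd⟩
    by_cases hp : p ∈ l
    · obtain ⟨l₁, l₂, rfl⟩ := List.append_of_mem hp
      have hch₂ : List.IsChain pvAdj (p :: l₂) := by
        have : List.IsChain pvAdj ((p :: l₁) ++ p :: l₂) := by
          simpa using hch
        exact (List.isChain_cons_split.mp this).2
      have hlen₂ : l₂.length ≤ n := by
        simp only [List.length_append, List.length_cons] at hlen
        omega
      obtain ⟨l', hsub, hl', hch', hlast', hnd'⟩ := ih l₂ p hlen₂ hch₂
      refine ⟨l', ?_, ?_, hch', ?_, hnd'⟩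
      · intro x hx
        exact List.mem_append_right _ (List.mem_cons_of_mem _ (hsub hx))
      · simp only [List.length_append, List.length_cons]; omega
      · rw [hlast', ← List.cons_append, List.getLast?_append_cons]
    · cases l with
      | nil => simp at hnd
      | cons x t =>
        have h2 := List.isChain_cons_cons.mp hch
        have hlent : t.length ≤ n := by
          simp only [List.length_cons] at hlen; omega
        obtain ⟨t', hsub, hlt', hch', hlast', hnd'⟩ := ih t x hlent h2.2
        refine ⟨x :: t', ?_, ?_, ?_, ?_, ?_⟩
        · intro y hy
          rcases List.mem_cons.mp hy with rfl | hy'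
          · exact List.mem_cons_self
          · exact List.mem_cons_of_mem _ (hsub hy')
        · simp only [List.length_cons]; omega
        · exact List.isChain_cons_cons.mpr ⟨h2.1, hch'⟩
        · rw [List.getLast?_cons_cons, hlast', List.getLast?_cons_cons]
        · refine List.nodup_cons.mpr ⟨?_, hnd'⟩
          intro hmem
          rcases List.mem_cons.mp hmem with rfl | hmem'
          · exact hp List.mem_cons_self
          · exact hp (List.mem_cons_of_mem _ (hsub hmem'))

theorem pv_chain_shorten :
    ∀ (l : List (Int × Int)) (p : Int × Int), List.IsChain pvAdj (p :: l) →
    ∃ l', l' ⊆ l ∧ l'.length ≤ l.length ∧ List.IsChain pvAdj (p :: l') ∧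
      (p :: l').getLast? = (p :: l).getLast? ∧ (p :: l').Nodup :=
  fun l p hch => pv_chain_shorten_aux l.length l p (le_refl _) hch

theorem pv_chain_reachN (G : List (List String)) :
    ∀ (l : List (Int × Int)) (p q : Int × Int), List.IsChain pvAdj (p :: l) →
    (∀ x ∈ l, pvF G x) → (p :: l).getLast? = some q → pvReachN G l.length p q := by
  intro l
  induction l with
  | nil =>
    intro p q _ _ hlast
    simp only [List.getLast?_singleton, Option.some.injEq] at hlast
    exact hlast.symm
  | cons x t ih =>
    intro p q hch hF hlast
    have h2 := List.isChain_cons_cons.mp hch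
    refine Or.inr ⟨x, h2.1, hF x List.mem_cons_self, ?_⟩
    exact ih x q h2.2 (fun y hy => hF y (List.mem_cons_of_mem _ hy))
      (by rw [List.getLast?_cons_cons] at hlast; exact hlast)

theorem pv_reachN_succ (G : List (List String)) {k : Nat} {p q : Int × Int}
    (h : pvReachN G k p q) : pvReachN G (k + 1) p q := Or.inl h

theorem pv_reachN_mono (G : List (List String)) {k k' : Nat} (h : k ≤ k')
    {p q : Int × Int} (hr : pvReachN G k p q) : pvReachN G k' p q := by
  induction k' with
  | zero => exact (Nat.le_zero.mp h) ▸ hr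
  | succ k' ih =>
    rcases Nat.lt_or_ge k (k' + 1) with hlt | hge
    · exact pv_reachN_succ G (ih (Nat.lt_succ_iff.mp hlt))
    · exact (Nat.le_antisymm h hge) ▸ hr

theorem pv_reachN_sound (G : List (List String)) :
    ∀ (k : Nat) (p q : Int × Int), pvF G p → pvReachN G k p q → pvReach (pvF G) p q := by
  intro k
  induction k with
  | zero =>
    intro p q hp h
    exact h ▸ .refl p hp
  | succ k ih =>
    intro p q hp h
    rcases h with h | ⟨t, htn, htF, htr⟩
    · exact ih p q hp h
    · exact .head p t q hp htn (ih t q htF htr)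

theorem pv_mem_cells (G : List (List String)) (p : Int × Int) :
    p ∈ pvCells G ↔ pvF G p := by
  obtain ⟨a, b⟩ := p
  simp only [pvCells, pvF, pvFb, List.mem_flatMap, List.mem_map, List.mem_filter,
    PySem.List.mem_pyRange_one, pv_widthB_eq, Bool.and_eq_true, decide_eq_true_eq, beq_iff_eq]
  constructor
  · rintro ⟨r, hr, c, ⟨hc, hcell⟩, heq⟩
    obtain ⟨rfl, rfl⟩ := Prod.mk.injEq .. ▸ heq
    exact ⟨⟨by omega, by omega, by omega, by omega⟩, hcell⟩
  · rintro ⟨⟨h1, h2, h3, h4⟩, hcell⟩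
    exact ⟨a, ⟨by omega, by omega⟩, b, ⟨⟨by omega, by omega⟩, hcell⟩, rfl⟩

theorem pv_cells_nodup (G : List (List String)) : (pvCells G).Nodup := by
  refine List.nodup_flatMap.mpr ⟨fun r _ => ?_, ?_⟩
  · exact ((PySem.List.nodup_pyRange_one _ _).filter _).map
      (fun c c' h => by simpa using congrArg Prod.snd h)
  · refine (PySem.List.nodup_pyRange_one _ _).imp ?_
    intro r r' hne
    simp only [Function.onFun, List.disjoint_left, List.mem_map]
    rintro x ⟨c, _, rfl⟩ hmem
    obtain ⟨c', _, hx⟩ := hmem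
    exact hne (congrArg Prod.fst hx).symm

theorem pv_reachN_complete (G : List (List String)) {p q : Int × Int} (hp : pvF G p)
    (h : pvReach (pvF G) p q) : pvReachN G (pvCells G).length p q := by
  obtain ⟨hPp, l, hch, hlF, hlast⟩ := (pv_reach_iff_chain (pvF G) p q).mp h
  obtain ⟨l', hsub, hlen, hch', hlast', hnd⟩ := pv_chain_shorten l p hch
  have hlF' : ∀ x ∈ l', pvF G x := fun x hx => hlF x (hsub hx)
  have hrN : pvReachN G l'.length p q :=
    pv_chain_reachN G l' p q hch' hlF' (by rw [hlast', hlast])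
  have hsubc : (p :: l') ⊆ pvCells G := by
    intro x hx
    rcases List.mem_cons.mp hx with rfl | hx'
    · exact (pv_mem_cells G x).mpr hp
    · exact (pv_mem_cells G x).mpr (hlF' x hx')
  have hb : (p :: l').length ≤ (pvCells G).length :=
    (List.subperm_of_subset hnd hsubc).length_le
  exact pv_reachN_mono G (by simp only [List.length_cons] at hb; omega) hrN

-- ---- the label dict of B ----
theorem pv_minSpec_unique {S : (Int × Int) → Prop} {w v v' : Int}
    (h1 : pvMinSpec S w v) (h2 : pvMinSpec S w v') : v = v' := by
  obtain ⟨⟨q1, hq1, he1⟩, hub1⟩ := h1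
  obtain ⟨⟨q2, hq2, he2⟩, hub2⟩ := h2
  have := hub1 q2 hq2
  have := hub2 q1 hq1
  omega

theorem pv_minSpec_congr {S S' : (Int × Int) → Prop} (h : ∀ x, S x ↔ S' x) {w v : Int}
    (hm : pvMinSpec S w v) : pvMinSpec S' w v := by
  obtain ⟨⟨q, hq, he⟩, hub⟩ := hm
  exact ⟨⟨q, (h q).mp hq, he⟩, fun q' hq' => hub q' ((h q').mpr hq')⟩

theorem pv_minSpec_union {S T : (Int × Int) → Prop} {w m m' : Int}
    (h1 : pvMinSpec S w m) (h2 : pvMinSpec T w m') :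
    pvMinSpec (fun x => S x ∨ T x) w (if m' < m then m' else m) := by
  obtain ⟨⟨qs, hqs, hms⟩, hub1⟩ := h1
  obtain ⟨⟨qt, hqt, hmt⟩, hub2⟩ := h2
  split_ifs with h
  · exact ⟨⟨qt, Or.inr hqt, hmt⟩,
      fun q hq => hq.elim (fun hs => le_of_lt (lt_of_lt_of_le h (hub1 q hs))) (hub2 q)⟩
  · exact ⟨⟨qs, Or.inl hqs, hms⟩,
      fun q hq => hq.elim (hub1 q) (fun ht => le_trans (not_lt.mp h) (hub2 q ht))⟩

theorem pv_foldMin_spec (G : List (List String)) (k : Nat) :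
    ∀ (qs : List (Int × Int)) (m : Int) (S : (Int × Int) → Prop),
    pvMinSpec S (pvWidth G) m →
    (∀ t ∈ qs, pvF G t → pvMinSpec (pvReachN G k t) (pvWidth G) (pvVal G k t)) →
    pvMinSpec (fun x => S x ∨ ∃ t ∈ qs, pvF G t ∧ pvReachN G k t x) (pvWidth G)
      (qs.foldl (fun m q =>
        if pvFb G q then (if pvVal G k q < m then pvVal G k q else m) else m) m) := by
  intro qs
  induction qs with
  | nil =>
    intro m S hS _
    exact pv_minSpec_congr (by simp) hS
  | cons q qs' ih =>
    intro m S hS hq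
    rw [List.foldl_cons]
    cases hF : pvFb G q with
    | false =>
      simp only [hF, Bool.false_eq_true, if_false]
      refine pv_minSpec_congr ?_
        (ih m S hS (fun t ht htF => hq t (List.mem_cons_of_mem _ ht) htF))
      intro x
      constructor
      · rintro (h | ⟨t, ht, htF, htr⟩)
        · exact Or.inl h
        · exact Or.inr ⟨t, List.mem_cons_of_mem _ ht, htF, htr⟩
      · rintro (h | ⟨t, ht, htF, htr⟩)
        · exact Or.inl h
        · rcases List.mem_cons.mp ht with rfl | ht'
          · exact absurd htF (by simp [pvF, hF])
          · exact Or.inr ⟨t, ht', htF, htr⟩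
    | true =>
      simp only [hF, if_true]
      have hqF : pvF G q := hF
      have hu := pv_minSpec_union hS (hq q List.mem_cons_self hqF)
      refine pv_minSpec_congr ?_
        (ih _ _ hu (fun t ht htF => hq t (List.mem_cons_of_mem _ ht) htF))
      intro x
      constructor
      · rintro ((h | h) | ⟨t, ht, htF, htr⟩)
        · exact Or.inl h
        · exact Or.inr ⟨q, List.mem_cons_self, hqF, h⟩
        · exact Or.inr ⟨t, List.mem_cons_of_mem _ ht, htF, htr⟩
      · rintro (h | ⟨t, ht, htF, htr⟩)
        · exact Or.inl (Or.inl h)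
        · rcases List.mem_cons.mp ht with rfl | ht'
          · exact Or.inl (Or.inr htr)
          · exact Or.inr ⟨t, ht', htF, htr⟩

theorem pv_val_minSpec (G : List (List String)) :
    ∀ (k : Nat) (p : Int × Int), pvF G p →
      pvMinSpec (pvReachN G k p) (pvWidth G) (pvVal G k p) := by
  intro k
  induction k with
  | zero =>
    intro p _
    exact ⟨⟨p, rfl, rfl⟩, fun q hq => le_of_eq (congrArg (pvIdx (pvWidth G)) hq.symm)⟩
  | succ k ih =>
    intro p hp
    exact pv_foldMin_spec G k (pvNbrs p) (pvVal G k p) (pvReachN G k p) (ih p hp)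
      (fun t _ htF => ih t htF)

-- the labels dict has exactly the forest cells as keys, in order, through every pass
theorem pv_labels0_items (G : List (List String)) :
    ((pvCells G).foldl (fun d p => d.insert p (p.1 * pvWidthB G + p.2))
      PySem.Dict.empty).items = (pvCells G).map (fun p => (p, pvVal G 0 p)) := by
  have h := PySem.Dict.items_foldl_insert_fresh (l := pvCells G) (k := fun p => p)
    (v := fun p : Int × Int => p.1 * pvWidthB G + p.2) (d := PySem.Dict.empty)
    (by intro a _; simp) (by simp only [List.map_id']; exact pv_cells_nodup G)
  rw [h]
  simp [pvVal, pvIdx, pv_widthB_eq, PySem.Dict.empty]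

theorem pv_pass_items (G : List (List String)) (lab : PySem.Dict (Int × Int) Int)
    (f : (Int × Int) → Int)
    (hit : lab.items = (pvCells G).map (fun p => (p, f p))) :
    (pvPass (pvCells G) lab).items = (pvCells G).map (fun p =>
      (p, (pvNbrs p).foldl (fun m q =>
        if pvFb G q then (if f q < m then f q else m) else m) (f p))) := by
  have hkeys : lab.keys.Nodup := by
    have : lab.keys = pvCells G := by
      simp [PySem.Dict.keys, hit, Function.comp_def]
    rw [this]; exact pv_cells_nodup G
  have hget : ∀ q, lab.get? q = if q ∈ pvCells G then some (f q) else none := by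
    intro q
    split_ifs with hq
    · have hmem : (q, f q) ∈ lab.items := by
        rw [hit]; exact List.mem_map_of_mem hq
      exact PySem.Dict.get?_of_mem_items (d := lab) hmem hkeys
    · rw [PySem.Dict.get?_eq_none_iff_not_mem_keys]
      simp [PySem.Dict.keys, hit, Function.comp_def, hq]
  rw [pvPass]
  have h := PySem.Dict.items_foldl_insert_fresh (l := pvCells G) (k := fun p => p)
    (v := fun p : Int × Int => (pvNbrs p).foldl (fun m q =>
      match lab.get? q with
      | some v => if v < m then v else m
      | none => m) (lab.getD p 0)) (d := PySem.Dict.empty)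
    (by intro a _; simp) (by simp only [List.map_id']; exact pv_cells_nodup G)
  rw [h]
  have hemp : PySem.Dict.empty.items = ([] : List ((Int × Int) × Int)) := rfl
  rw [hemp, List.nil_append]
  refine List.map_congr_left ?_
  intro p hp
  refine congrArg (fun z => (p, z)) ?_
  beta_reduce
  have hbase : lab.getD p 0 = f p := by
    rw [PySem.Dict.getD_eq_get?_getD, hget p, if_pos hp]
    rfl
  rw [hbase]
  refine PySem.List.foldl_congr_mem' _ _ _ _ ?_
  intro q _ m
  rw [hget q]
  by_cases hq : q ∈ pvCells G
  · rw [if_pos hq]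
    have hfb : pvFb G q = true := (pv_mem_cells G q).mp hq
    rw [hfb]
    simp
  · rw [if_neg hq]
    have hfb : pvFb G q = false := by
      cases hfb : pvFb G q
      · rfl
      · exact absurd ((pv_mem_cells G q).mpr hfb) hq
    rw [hfb]
    simp

theorem pv_labels_items (G : List (List String)) :
    ∀ (k : Nat),
      ((pvPass (pvCells G))^[k] ((pvCells G).foldl
        (fun d p => d.insert p (p.1 * pvWidthB G + p.2)) PySem.Dict.empty)).items
      = (pvCells G).map (fun p => (p, pvVal G k p)) := by
  intro k
  induction k with
  | zero => simpa using pv_labels0_items G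
  | succ k ih =>
    rw [Function.iterate_succ_apply', pv_pass_items G _ (pvVal G k) ih]
    rfl

theorem pv_foldl_iterate {α β : Type} (f : β → β) :
    ∀ (l : List α) (init : β), l.foldl (fun b _ => f b) init = f^[l.length] init := by
  intro l
  induction l with
  | nil => intro init; rfl
  | cons a l ih =>
    intro init
    rw [List.foldl_cons, ih, List.length_cons, Function.iterate_succ_apply]

-- cells share their stabilised label iff they are connected
theorem pv_val_component (G : List (List String)) {p x : Int × Int}
    (hp : pvF G p) (hx : pvF G x) :
    pvVal G (pvCells G).length x = pvVal G (pvCells G).length p ↔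
      pvReach (pvF G) p x := by
  have hiff : ∀ y, pvF G y → ∀ q,
      pvReachN G (pvCells G).length y q ↔ pvReach (pvF G) y q := fun y hy q =>
    ⟨pv_reachN_sound G _ y q hy, pv_reachN_complete G hy⟩
  have hmp := pv_minSpec_congr (hiff p hp) (pv_val_minSpec G _ p hp)
  have hmx := pv_minSpec_congr (hiff x hx) (pv_val_minSpec G _ x hx)
  constructor
  · intro he
    obtain ⟨⟨q0, hq0, he0⟩, hub0⟩ := hmp
    obtain ⟨⟨q1, hq1, he1⟩, hub1⟩ := hmx
    have hidx : pvIdx (pvWidth G) q0 = pvIdx (pvWidth G) q1 := by rw [← he0, ← he1, he]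
    have hq01 : q0 = q1 := pv_idx_inj G (pv_reach_end hq0) (pv_reach_end hq1) hidx
    exact pv_reach_trans hq0 (pv_reach_symm (hq01 ▸ hq1))
  · intro hr
    refine pv_minSpec_unique hmx (pv_minSpec_congr ?_ hmp)
    intro q
    exact ⟨fun h => pv_reach_trans (pv_reach_symm hr) h, fun h => pv_reach_trans hr h⟩

-- the grouping loop of B produces, per distinct label, the cells carrying it (in order)
theorem pv_groups (G : List (List String)) :
    ((((pvCells G).map (fun p => (p, pvVal G (pvCells G).length p))).foldl
      (fun d pl => d.modify pl.2 ([] : List (Int × Int)) (· ++ [pl.1]))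
      PySem.Dict.empty).values)
    = (PySem.Set.ofList ((pvCells G).map (fun p => pvVal G (pvCells G).length p))).map
        (fun v => (pvCells G).filter (fun p => pvVal G (pvCells G).length p == v)) := by
  set n := (pvCells G).length with hn
  set vals := fun p : Int × Int => pvVal G n p with hvals
  set l := (pvCells G).map (fun p => (p, vals p)) with hl
  have hkeys : (l.foldl (fun d pl => d.modify pl.2 ([] : List (Int × Int)) (· ++ [pl.1]))
      PySem.Dict.empty).keys = PySem.Set.ofList ((pvCells G).map vals) := by
    have h := PySem.Dict.keys_foldl_modify_key (l := l) (key := fun pl => pl.2)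
      (d0 := ([] : List (Int × Int))) (f := fun _ pl => (· ++ [pl.1]))
      (d := PySem.Dict.empty)
    rw [h]
    have : l.map (fun pl => pl.2) = (pvCells G).map vals := by
      rw [hl, List.map_map]; rfl
    rw [this]
    rfl
  have hnd : (l.foldl (fun d pl => d.modify pl.2 ([] : List (Int × Int)) (· ++ [pl.1]))
      PySem.Dict.empty).keys.Nodup := by
    exact PySem.Dict.nodup_keys_foldl_modify_key l (fun pl => pl.2) _ _ _
      PySem.Dict.nodup_keys_empty
  rw [PySem.Dict.values_eq_map_keys _ hnd ([] : List (Int × Int)), hkeys]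
  refine List.map_congr_left ?_
  intro v _
  have hswap : (l.foldl (fun d pl => d.modify pl.2 ([] : List (Int × Int)) (· ++ [pl.1]))
      PySem.Dict.empty)
      = ((l.map (fun pl => (pl.2, pl.1))).foldl
          (fun d pr => d.modify pr.1 ([] : List (Int × Int)) (· ++ [pr.2]))
          PySem.Dict.empty) := by
    conv_rhs => rw [List.foldl_map]
  rw [hswap, PySem.Dict.getD_foldl_modify_append]
  have h1 : l.map (fun pl => (pl.2, pl.1)) = (pvCells G).map (fun p => (vals p, p)) := by
    rw [hl, List.map_map]; rfl
  rw [h1, List.filter_map]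
  rw [List.map_map]
  have h2 : ((fun pr : Int × (Int × Int) => pr.2) ∘ fun p => (vals p, p)) = id := rfl
  have h3 : ((fun pr : Int × (Int × Int) => pr.1 == v) ∘ fun p => (vals p, p))
      = fun p => vals p == v := rfl
  rw [h2, h3, List.map_id]
  simp only [PySem.Dict.getD_empty, List.nil_append]
  rfl

theorem pv_deepwood_alt_eq_groups (G : List (List String)) :
    deepwood_alt G =
      ((PySem.Set.ofList ((pvCells G).map (fun p => pvVal G (pvCells G).length p))).map
        (fun v => (pvCells G).filter (fun p => pvVal G (pvCells G).length p == v))).foldl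
        (fun n members =>
          if 5 ≤ members.length ∧ pvVillB G (G.length : Int) (pvWidthB G) members = false
          then n + 1 else n) (0 : Int) * 6 := by
  rw [deepwood_alt]
  rw [pv_foldl_iterate (pvPass (pvCells G))]
  have hlen : (PySem.List.pyRange 0 ((pvCells G).length : Int) 1).length
      = (pvCells G).length := by
    rw [PySem.List.length_pyRange_one]
    simp
  rw [hlen]
  have hitems := pv_labels_items G (pvCells G).length
  rw [hitems, pv_groups]

-- both counted conditions only depend on the member set
theorem pv_villnb_eq (G : List (List String)) (p : Int × Int) :
    (([((1 : Int), (0 : Int)), (-1, 0), (0, 1), (0, -1)]).any (fun d =>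
      decide (0 ≤ p.1 + d.1 ∧ p.1 + d.1 < (G.length : Int) ∧ 0 ≤ p.2 + d.2 ∧
        p.2 + d.2 < pvWidth G) &&
      (pvCellAt G (p.1 + d.1) (p.2 + d.2) == some "village"))) = pvVillNb G p := by
  simp [pvVillNb, pvNbrs]
  ring_nf

theorem pv_predA_eq (G : List (List String)) (K : List (Int × Int)) (hnd : K.Nodup) :
    decide (5 ≤ K.length ∧ pvIsAdjVillage G K = false) = pvPredSet G K.toFinset := by
  have hany : pvIsAdjVillage G K = decide (∃ p ∈ K.toFinset, pvVillNb G p = true) := by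
    by_cases h : ∃ p ∈ K, pvVillNb G p = true
    · have hA : pvIsAdjVillage G K = true := by
        rw [pvIsAdjVillage, List.any_eq_true]
        obtain ⟨p, hp, hv'⟩ := h
        exact ⟨p, hp, by rw [pv_villnb_eq]; exact hv'⟩
      rw [hA]
      symm; rw [decide_eq_true_eq]
      obtain ⟨p, hp, hv'⟩ := h
      exact ⟨p, List.mem_toFinset.mpr hp, hv'⟩
    · have hA : pvIsAdjVillage G K = false := by
        rw [pvIsAdjVillage, List.any_eq_false]
        intro p hp
        rw [pv_villnb_eq]
        exact fun hc => h ⟨p, hp, hc⟩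
      rw [hA]
      symm; rw [decide_eq_false_iff_not]
      rintro ⟨p, hpX, hc⟩
      exact h ⟨p, List.mem_toFinset.mp hpX, hc⟩
  rw [pvPredSet, List.toFinset_card_of_nodup hnd, ← hany]
  cases hvill : pvIsAdjVillage G K <;> by_cases hc : 5 ≤ K.length <;> simp [hvill, hc]

theorem pv_villB_any (G : List (List String)) (K : List (Int × Int)) :
    pvVillB G (G.length : Int) (pvWidthB G) K = K.any (fun p => pvVillNb G p) := by
  rw [pvVillB, pv_widthB_eq]
  rfl

theorem pv_predB_eq (G : List (List String)) (K : List (Int × Int)) (hnd : K.Nodup) :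
    decide (5 ≤ K.length ∧ pvVillB G (G.length : Int) (pvWidthB G) K = false) =
      pvPredSet G K.toFinset := by
  have hany : pvVillB G (G.length : Int) (pvWidthB G) K
      = decide (∃ p ∈ K.toFinset, pvVillNb G p = true) := by
    rw [pv_villB_any]
    by_cases h : ∃ p ∈ K, pvVillNb G p = true
    · have hA : K.any (fun p => pvVillNb G p) = true := List.any_eq_true.mpr h
      rw [hA]
      symm; rw [decide_eq_true_eq]
      obtain ⟨p, hp, hv'⟩ := h
      exact ⟨p, List.mem_toFinset.mpr hp, hv'⟩
    · have hA : K.any (fun p => pvVillNb G p) = false := by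
        rw [List.any_eq_false]
        exact fun p hp hc => h ⟨p, hp, hc⟩
      rw [hA]
      symm; rw [decide_eq_false_iff_not]
      rintro ⟨p, hpX, hc⟩
      exact h ⟨p, List.mem_toFinset.mp hpX, hc⟩
  rw [pvPredSet, List.toFinset_card_of_nodup hnd, ← hany]
  cases hvill : pvVillB G (G.length : Int) (pvWidthB G) K <;>
    by_cases hc : 5 ≤ K.length <;> simp [hvill, hc]

-- every A-cluster / B-group, as a Finset, is exactly a connected forest component
theorem pv_deepwood_count (G : List (List String)) :
    deepwood G = deepwood_alt G := by
  rw [pv_deepwood_eq_scan, pv_deepwood_alt_eq_groups]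
  obtain ⟨hVnd, hVF, hCls, hOK, hcov, -⟩ :=
    pv_scanFold_spec G (pvScanL G) [] []
      (fun p hp => (pv_mem_scanL G p).mp hp) List.nodup_nil
      (by intro p hp; simp at hp)
      (by intro x hx; simp at hx)
      ⟨by intro K hK; simp at hK, List.Pairwise.nil, by simp⟩
  obtain ⟨hKprops, hPw, hVmem⟩ := hOK
  set st := (pvScanL G).foldl (pvStep G)
    (([] : PySem.Set (Int × Int)), ([] : List (List (Int × Int)))) with hst
  set groups := (PySem.Set.ofList ((pvCells G).map (fun p => pvVal G (pvCells G).length p))).map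
    (fun v => (pvCells G).filter (fun p => pvVal G (pvCells G).length p == v)) with hgroups
  have hseedmem : ∀ K ∈ st.2, ∃ s, pvF G s ∧ (∀ q, q ∈ K ↔ pvReach (pvF G) s q) :=
    fun K hK => (hKprops K hK).2
  have hknodup : ∀ K ∈ st.2, K.Nodup := fun K hK => (hKprops K hK).1
  have hgnodup : ∀ X ∈ groups, X.Nodup := by
    intro X hX
    rw [hgroups] at hX
    obtain ⟨v, hv, rfl⟩ := List.mem_map.mp hX
    exact (pv_cells_nodup G).filter _
  have hMA : ∀ X : Finset (Int × Int), X ∈ st.2.map List.toFinset ↔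
      ∃ s, pvF G s ∧ ∀ y, y ∈ X ↔ pvReach (pvF G) s y := by
    intro X
    constructor
    · intro hX
      obtain ⟨K, hK, rfl⟩ := List.mem_map.mp hX
      obtain ⟨s, hsF, hKiff⟩ := hseedmem K hK
      exact ⟨s, hsF, fun y => by rw [List.mem_toFinset]; exact hKiff y⟩
    · rintro ⟨s, hsF, hXiff⟩
      have hsInB : s ∈ pvScanL G := (pv_mem_scanL G s).mpr (by
        have h := hsF
        simp only [pvF, pvFb, Bool.and_eq_true, decide_eq_true_eq] at h
        exact h.1)
      have hsV : s ∈ st.1 := hcov s hsInB hsF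
      obtain ⟨K, hK, hsK⟩ := (hVmem s).mp hsV
      obtain ⟨s0, hs0F, hK0iff⟩ := hseedmem K hK
      have hr0 : pvReach (pvF G) s0 s := (hK0iff s).mp hsK
      refine List.mem_map.mpr ⟨K, hK, ?_⟩
      apply Finset.ext; intro y
      rw [List.mem_toFinset, hK0iff y, hXiff y]
      exact ⟨fun h => pv_reach_trans (pv_reach_symm hr0) h, fun h => pv_reach_trans hr0 h⟩
  have hMB : ∀ X : Finset (Int × Int), X ∈ groups.map List.toFinset ↔
      ∃ s, pvF G s ∧ ∀ y, y ∈ X ↔ pvReach (pvF G) s y := by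
    intro X
    rw [hgroups, List.map_map]
    constructor
    · intro hX
      obtain ⟨v, hv, rfl⟩ := List.mem_map.mp hX
      have hv' : v ∈ (pvCells G).map (fun p => pvVal G (pvCells G).length p) := by
        rwa [PySem.Set.mem_ofList] at hv
      obtain ⟨s, hs, hvs⟩ := List.mem_map.mp hv'
      have hsF : pvF G s := (pv_mem_cells G s).mp hs
      refine ⟨s, hsF, fun y => ?_⟩
      simp only [Function.comp_apply, List.mem_toFinset, List.mem_filter]
      constructor
      · rintro ⟨hyc, hyv⟩
        have hyF := (pv_mem_cells G y).mp hyc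
        have hval : pvVal G (pvCells G).length y = pvVal G (pvCells G).length s := by
          rw [beq_iff_eq] at hyv
          rw [hyv, ← hvs]
        exact (pv_val_component G hsF hyF).mp hval
      · intro hr
        have hyF : pvF G y := pv_reach_end hr
        refine ⟨(pv_mem_cells G y).mpr hyF, ?_⟩
        rw [beq_iff_eq, (pv_val_component G hsF hyF).mpr hr, hvs]
    · rintro ⟨s, hsF, hXiff⟩
      have hs : s ∈ pvCells G := (pv_mem_cells G s).mpr hsF
      refine List.mem_map.mpr ⟨pvVal G (pvCells G).length s,
        (by rw [PySem.Set.mem_ofList]; exact List.mem_map_of_mem hs), ?_⟩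
      simp only [Function.comp_apply]
      apply Finset.ext; intro y
      rw [List.mem_toFinset, List.mem_filter, hXiff y]
      constructor
      · rintro ⟨hyc, hyv⟩
        have hyF := (pv_mem_cells G y).mp hyc
        rw [beq_iff_eq] at hyv
        exact (pv_val_component G hsF hyF).mp hyv
      · intro hr
        have hyF : pvF G y := pv_reach_end hr
        exact ⟨(pv_mem_cells G y).mpr hyF, by
          rw [beq_iff_eq]; exact (pv_val_component G hsF hyF).mpr hr⟩
  have hndA : (st.2.map List.toFinset).Nodup := by
    refine List.pairwise_map.mpr (List.Pairwise.imp_of_mem ?_ hPw)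
    intro K K' hK hK' hdisj heq
    obtain ⟨s, hsF, hKiff⟩ := hseedmem K hK
    have hsK : s ∈ K := (hKiff s).mpr (.refl s hsF)
    have hsK' : s ∈ K' := List.mem_toFinset.mp (heq ▸ List.mem_toFinset.mpr hsK)
    exact hdisj s hsK hsK'
  have hndB : (groups.map List.toFinset).Nodup := by
    rw [hgroups, List.map_map]
    refine List.pairwise_map.mpr (List.Pairwise.imp_of_mem ?_ (PySem.Set.nodup_ofList _))
    intro v v' hv hv' hne heq
    have hv' : v ∈ (pvCells G).map (fun p => pvVal G (pvCells G).length p) := by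
      rwa [PySem.Set.mem_ofList] at hv
    obtain ⟨s, hs, hvs⟩ := List.mem_map.mp hv'
    have hsfil : s ∈ (pvCells G).filter (fun p => pvVal G (pvCells G).length p == v) :=
      List.mem_filter.mpr ⟨hs, by rw [beq_iff_eq]; exact hvs⟩
    have hsfil' : s ∈ (pvCells G).filter (fun p => pvVal G (pvCells G).length p == v') := by
      have h1 : s ∈ ((pvCells G).filter
          (fun p => pvVal G (pvCells G).length p == v)).toFinset :=
        List.mem_toFinset.mpr hsfil
      simp only [Function.comp_apply] at heq
      exact List.mem_toFinset.mp (heq ▸ h1)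
    have := (List.mem_filter.mp hsfil').2
    rw [beq_iff_eq] at this
    exact hne (by rw [← hvs, this])
  have hsetEq : (st.2.map List.toFinset).toFinset = (groups.map List.toFinset).toFinset := by
    apply Finset.ext; intro X
    rw [List.mem_toFinset, List.mem_toFinset, hMA X, hMB X]
  have hperm := List.perm_of_nodup_nodup_toFinset_eq hndA hndB hsetEq
  rw [PySem.List.foldl_ite_add_one, PySem.List.foldl_ite_add_one]
  have hA : st.2.countP (fun K => decide (5 ≤ K.length ∧ pvIsAdjVillage G K = false))
      = (st.2.map List.toFinset).countP (pvPredSet G) := by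
    conv_rhs => rw [List.countP_map]
    exact List.countP_congr (fun K hK => by
      simp only [Function.comp_apply, pv_predA_eq G K (hknodup K hK)])
  have hB : groups.countP (fun K => decide (5 ≤ K.length ∧
        pvVillB G (G.length : Int) (pvWidthB G) K = false))
      = (groups.map List.toFinset).countP (pvPredSet G) := by
    conv_rhs => rw [List.countP_map]
    exact List.countP_congr (fun K hK => by
      simp only [Function.comp_apply, pv_predB_eq G K (hgnodup K hK)])
  rw [hA, hB, hperm.countP_eq]

-- ===== VERDICT (by name: the statement is the Claim_ definition above) =====
theorem deepwood_spec : Claim_equal_deepwood := by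
  intro grid _ _
  exact pv_deepwood_count grid
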